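-- pv_equiv track=rewrite | github.com/pabloschwarzenberg/grader | tema10_ej3/tema10_ej3_826437a331d3bd03239b06b27d1c1234.py | archivo_a_lista
-- ===== SOURCE A (Python) =====
-- def archivo_a_lista(archivo):
--     lista = [[]]
--     numero = 0
--     for i in range(len(archivo)):
--         if archivo[i] == " ":
--             pass
--         elif archivo[i] == "\n":
--             lista.append([])
--             numero += 1
--         else:
--             lista[numero].append(archivo[i])
--     return(lista)
-- ===== SOURCE B (Python) =====
-- def archivo_a_lista(archivo):
--     return [[c for c in linea if c != " "] for linea in archivo.split("\n")]
-- ===== Notes on version B (the rewrite author's own statement) =====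
-- stated objective: simpler
-- what changed: Replaces A's single flat pass with a running line-counter and in-place append at lista[numero] by a two-level decomposition: split the string into its lines first, then map each line to the list of its non-space characters.
import Mathlib
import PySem

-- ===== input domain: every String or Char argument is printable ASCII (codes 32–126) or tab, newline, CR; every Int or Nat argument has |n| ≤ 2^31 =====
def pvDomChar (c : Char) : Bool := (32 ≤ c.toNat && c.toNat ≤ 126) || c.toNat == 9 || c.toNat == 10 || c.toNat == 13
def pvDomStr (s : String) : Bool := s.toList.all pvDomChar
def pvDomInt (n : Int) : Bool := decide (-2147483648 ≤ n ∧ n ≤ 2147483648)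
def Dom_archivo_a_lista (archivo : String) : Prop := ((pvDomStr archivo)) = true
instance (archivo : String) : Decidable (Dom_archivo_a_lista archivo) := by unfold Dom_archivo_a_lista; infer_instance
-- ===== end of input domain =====

-- B replaces A's flat single pass with a running line counter by split-on-'\n' first,
-- then a per-line filter of spaces (objective: simpler decomposition; same cost).

-- ===== PORT A =====
-- A's loop body: skip ' ', on '\n' append a fresh sublist and bump the counter,
-- otherwise append the character (as a 1-char string) to the sublist at the counter.
def aStep (st : List (List String) × Nat) (c : Char) : List (List String) × Nat :=
  if c = ' ' then st
  else if c = '\n' then (st.1 ++ [[]], st.2 + 1)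
  else (st.1.modify st.2 (fun l => l ++ [String.singleton c]), st.2)

def archivo_a_lista (archivo : String) : List (List String) :=
  (archivo.toList.foldl aStep ([[]], 0)).1

-- ===== PORT B =====
def archivo_a_lista_alt (archivo : String) : List (List String) :=
  (archivo.toList.splitOn '\n').map
    (fun linea => (linea.filter (fun c => c ≠ ' ')).map String.singleton)

-- ===== PRECONDITION & SPEC =====
def Spec_archivo_a_lista (archivo : String) (out : List (List String)) : Prop := out = archivo_a_lista_alt archivo
instance (archivo : String) (out : List (List String)) : Decidable (Spec_archivo_a_lista archivo out) := by unfold Spec_archivo_a_lista; infer_instance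

-- ===== CLAIM (what is proved, stated in full; the proofs are below) =====
def Claim_equal_archivo_a_lista : Prop := ∀ (archivo : String), Dom_archivo_a_lista archivo → Spec_archivo_a_lista archivo (archivo_a_lista archivo)

-- ===== LEMMAS AND PROOFS =====

-- B's per-line transformation, named for the proofs
def fLine (l : List Char) : List String := (l.filter (fun c => c ≠ ' ')).map String.singleton

-- intermediate recursion: what A's loop produces from the remaining characters,
-- given the partial current line `cur`
def goB : List Char → List String → List (List String)
  | [], cur => [cur]
  | c :: cs, cur =>
    if c = ' ' then goB cs cur
    else if c = '\n' then cur :: goB cs []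
    else goB cs (cur ++ [String.singleton c])

theorem modify_append_last (init : List (List String)) (cur : List String)
    (f : List String → List String) :
    (init ++ [cur]).modify init.length f = init ++ [f cur] := by
  induction init with
  | nil => simp [List.modify]
  | cons a t ih => simpa [List.modify, List.modifyTailIdx, List.modifyTailIdx.go] using ih

theorem foldA_eq_goB (cs : List Char) : ∀ (init : List (List String)) (cur : List String),
    (cs.foldl aStep (init ++ [cur], init.length)).1 = init ++ goB cs cur := by
  induction cs with
  | nil => intro init cur; simp [goB]
  | cons c cs ih =>
    intro init cur
    by_cases h1 : c = ' '
    · simpa [aStep, goB, h1] using ih init cur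
    · by_cases h2 : c = '\n'
      · have := ih (init ++ [cur]) []
        simpa [aStep, goB, h1, h2, List.append_assoc] using this
      · have := ih init (cur ++ [String.singleton c])
        simpa [aStep, goB, h1, h2, modify_append_last] using this

theorem goB_eq_splitOn (cs : List Char) : ∀ (cur : List String),
    goB cs cur = ((cs.splitOn '\n').map fLine).modifyHead (fun l => cur ++ l) := by
  induction cs with
  | nil => intro cur; simp [goB, List.splitOn, fLine]
  | cons c cs ih =>
    intro cur
    obtain ⟨s, rest, hs⟩ := List.exists_cons_of_ne_nil
      (List.splitOnP_ne_nil (fun a => a == '\n') cs)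
    by_cases h2 : c = '\n'
    · simp [goB, h2, List.splitOn, List.splitOnP_cons, ih [], hs, fLine]
    · by_cases h1 : c = ' '
      · have : fLine (' ' :: s) = fLine s := by simp [fLine]
        simp [goB, h1, List.splitOn, List.splitOnP_cons, hs, ih cur, this]
      · have : fLine (c :: s) = String.singleton c :: fLine s := by
          simp [fLine, h1]
        simp [goB, h1, h2, List.splitOn, List.splitOnP_cons, hs,
          ih (cur ++ [String.singleton c]), this]

-- ===== VERDICT (by name: the statement is the Claim_ definition above) =====
theorem archivo_a_lista_spec : Claim_equal_archivo_a_lista := by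
  intro archivo _
  show archivo_a_lista archivo = archivo_a_lista_alt archivo
  obtain ⟨s, rest, hs⟩ := List.exists_cons_of_ne_nil
    (List.splitOnP_ne_nil (fun a => a == '\n') archivo.toList)
  have hA : archivo_a_lista archivo = goB archivo.toList [] := by
    simpa using foldA_eq_goB archivo.toList [] []
  rw [hA, goB_eq_splitOn archivo.toList []]
  simp [archivo_a_lista_alt, List.splitOn, hs, fLine]
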